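-- pv_equiv track=rewrite | github.com/pctablet505/HackerRank | algorithms/Winning Lottery Ticket.py | hashX
-- ===== SOURCE A (Python) =====
-- def hashX(x):
--     i=0
--     s=set([y for y in x])
--
--     binary=['0']*10
--     for i in range(10):
--         if str(i) in s:
--             binary[i]='1'
--     return int(''.join(binary),2)
-- ===== SOURCE B (Python) =====
-- def hashX(x):
--     r = 0
--     for c in x:
--         if '0' <= c <= '9':
--             r |= 1 << (9 - int(c))
--     return r
-- ===== Notes on version B (the rewrite author's own statement) =====
-- stated objective: simpler
-- what changed: Replaces A's build-a-set-of-all-chars, fixed loop over the 10 digits, char-list mutation, join and base-2 parse with a single accumulating pass over the string that ORs bit 9-int(c) into an integer for each digit character.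
import Mathlib
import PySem

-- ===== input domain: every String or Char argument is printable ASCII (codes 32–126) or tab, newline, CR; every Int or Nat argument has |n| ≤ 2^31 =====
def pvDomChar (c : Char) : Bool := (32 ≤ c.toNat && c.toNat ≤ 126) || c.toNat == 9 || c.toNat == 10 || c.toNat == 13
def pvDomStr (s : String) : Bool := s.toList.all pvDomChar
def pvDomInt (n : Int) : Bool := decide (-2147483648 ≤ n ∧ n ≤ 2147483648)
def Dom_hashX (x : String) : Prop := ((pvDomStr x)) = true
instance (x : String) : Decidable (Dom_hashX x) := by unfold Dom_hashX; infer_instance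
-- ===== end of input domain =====

-- B replaces A's set-of-all-chars + fixed loop over the ten digits + char-list mutation + join + base-2
-- parse with a single accumulating pass over the string, OR-ing bit (9 - int(c)) in for each digit char (objective: simpler).

-- ===== PORT A =====
-- str(i) for 0 ≤ i ≤ 9 is the single character chr(48 + i); exact on that range (only i = 0..9 occur below)
def digitStrChar (i : Int) : Char := Char.ofNat (48 + i.toNat)

def hashX (x : String) : Int :=
  -- s = set([y for y in x])
  let s : PySem.Set Char := PySem.Set.ofList x.toList
  -- binary = ['0'] * 10
  let binary : List Char := List.replicate 10 '0'
  -- for i in range(10): if str(i) in s: binary[i] = '1'   (indices 0..9 are always in range, so pySetD is exact)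
  let binary := (PySem.List.pyRange 0 10 1).foldl
    (fun b i => if PySem.Set.contains s (digitStrChar i) then PySem.List.pySetD b i '1' else b) binary
  -- int(''.join(binary), 2): hand port of the base-2 parse, exact for non-empty strings of '0'/'1'
  binary.foldl (fun acc c => acc * 2 + (if c = '1' then (1 : Int) else 0)) 0

-- ===== PORT B =====
-- '0' <= c <= '9' is Char order on code points; int(c) for a digit character c is c.toNat - 48 (exact on '0'..'9')
def hashX_alt (x : String) : Int :=
  x.toList.foldl
    (fun r c => if '0' ≤ c ∧ c ≤ '9' then PySem.Int.bor r ((1 : Int) <<< (9 - (c.toNat - 48))) else r) 0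

-- ===== PRECONDITION & SPEC =====
def Spec_hashX (x : String) (out : Int) : Prop := out = hashX_alt x
instance (x : String) (out : Int) : Decidable (Spec_hashX x out) := by unfold Spec_hashX; infer_instance

-- ===== CLAIM (what is proved, stated in full; the proofs are below) =====
def Claim_equal_hashX : Prop := ∀ (x : String), Dom_hashX x → Spec_hashX x (hashX x)

-- ===== LEMMAS AND PROOFS =====

-- the common value of both programs: bit (9 - d) is set iff the digit character d occurs in the list
def mask (l : List Char) : Nat :=
  (if '0' ∈ l then 512 else 0) + (if '1' ∈ l then 256 else 0) + (if '2' ∈ l then 128 else 0) +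
  (if '3' ∈ l then 64 else 0) + (if '4' ∈ l then 32 else 0) + (if '5' ∈ l then 16 else 0) +
  (if '6' ∈ l then 8 else 0) + (if '7' ∈ l then 4 else 0) + (if '8' ∈ l then 2 else 0) +
  (if '9' ∈ l then 1 else 0)

-- Nat shadow of B's loop body
def fN (a : Nat) (c : Char) : Nat :=
  if '0' ≤ c ∧ c ≤ '9' then a ||| (1 <<< (9 - (c.toNat - 48))) else a

theorem digit_cases (c : Char) (h1 : '0' ≤ c) (h2 : c ≤ '9') :
    c = '0' ∨ c = '1' ∨ c = '2' ∨ c = '3' ∨ c = '4' ∨ c = '5' ∨ c = '6' ∨ c = '7' ∨ c = '8' ∨ c = '9' := by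
  have e : c = Char.ofNat c.toNat := (Char.ofNat_toNat c).symm
  have b1 : 48 ≤ c.toNat := h1
  have b2 : c.toNat ≤ 57 := h2
  set n := c.toNat with hn
  interval_cases n <;> simp [e]

theorem fN_lor (a : Nat) (c : Char) : fN a c = a ||| fN 0 c := by
  unfold fN
  split_ifs
  · rw [Nat.zero_or]
  · rw [Nat.or_zero]

theorem foldl_fN_lor : ∀ (l : List Char) (a : Nat), l.foldl fN a = a ||| l.foldl fN 0
  | [], a => (Nat.or_zero a).symm
  | c :: l, a => by
    simp only [List.foldl_cons]
    rw [foldl_fN_lor l (fN a c), foldl_fN_lor l (fN 0 c), fN_lor a c, Nat.or_assoc]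

set_option maxHeartbeats 1000000 in
theorem foldl_fN_mask : ∀ l : List Char, l.foldl fN 0 = mask l
  | [] => by simp [mask]
  | c :: l => by
    simp only [List.foldl_cons]
    rw [foldl_fN_lor l (fN 0 c), foldl_fN_mask l]
    by_cases hd : '0' ≤ c ∧ c ≤ '9'
    · rcases digit_cases c hd.1 hd.2 with rfl|rfl|rfl|rfl|rfl|rfl|rfl|rfl|rfl|rfl <;>
      · simp [fN, mask, List.mem_cons]
        simp only [← Bool.cond_decide]
        generalize decide ('0' ∈ l) = b0
        generalize decide ('1' ∈ l) = b1
        generalize decide ('2' ∈ l) = b2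
        generalize decide ('3' ∈ l) = b3
        generalize decide ('4' ∈ l) = b4
        generalize decide ('5' ∈ l) = b5
        generalize decide ('6' ∈ l) = b6
        generalize decide ('7' ∈ l) = b7
        generalize decide ('8' ∈ l) = b8
        generalize decide ('9' ∈ l) = b9
        revert b0 b1 b2 b3 b4 b5 b6 b7 b8 b9
        decide
    · have hne : ∀ d : Char, '0' ≤ d → d ≤ '9' → d ≠ c := fun d g1 g2 e => hd (e ▸ ⟨g1, g2⟩)
      rw [show fN 0 c = 0 from by simp [fN, hd], Nat.zero_or]
      simp [mask, List.mem_cons, (hne '0' (by decide) (by decide)), (hne '1' (by decide) (by decide)),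
        (hne '2' (by decide) (by decide)), (hne '3' (by decide) (by decide)), (hne '4' (by decide) (by decide)),
        (hne '5' (by decide) (by decide)), (hne '6' (by decide) (by decide)), (hne '7' (by decide) (by decide)),
        (hne '8' (by decide) (by decide)), (hne '9' (by decide) (by decide))]

theorem foldl_cast : ∀ (l : List Char) (a : Nat),
    l.foldl (fun r c => if '0' ≤ c ∧ c ≤ '9' then PySem.Int.bor r ((1 : Int) <<< (9 - (c.toNat - 48))) else r)
      (Int.ofNat a) = Int.ofNat (l.foldl fN a)
  | [], _ => rfl
  | c :: l, a => by
    simp only [List.foldl_cons]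
    rw [show (if '0' ≤ c ∧ c ≤ '9' then PySem.Int.bor (Int.ofNat a) ((1 : Int) <<< (9 - (c.toNat - 48)))
        else Int.ofNat a) = Int.ofNat (fN a c) from by unfold fN; split_ifs <;> rfl]
    exact foldl_cast l (fN a c)

theorem hashX_alt_eq_mask (x : String) : hashX_alt x = Int.ofNat (mask x.toList) := by
  unfold hashX_alt
  rw [show (0 : Int) = Int.ofNat 0 from rfl, foldl_cast, foldl_fN_mask]

theorem len10 (l : List Char) (h : l.length = 10) :
    l = [l.getD 0 '0', l.getD 1 '0', l.getD 2 '0', l.getD 3 '0', l.getD 4 '0',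
         l.getD 5 '0', l.getD 6 '0', l.getD 7 '0', l.getD 8 '0', l.getD 9 '0'] := by
  apply List.ext_getElem (by simp [h])
  intro i h1 h2
  rw [h] at h1
  interval_cases i <;> simp [h]

theorem foldA (s : PySem.Set Char) :
    ∀ (is : List Int), (∀ i ∈ is, 0 ≤ i ∧ i < 10) → ∀ (b : List Char), b.length = 10 →
    (List.foldl (fun b i => if PySem.Set.contains s (digitStrChar i) then PySem.List.pySetD b i '1' else b) b is).length = 10
    ∧ ∀ j : Nat, j < 10 →
      (List.foldl (fun b i => if PySem.Set.contains s (digitStrChar i) then PySem.List.pySetD b i '1' else b) b is).getD j '0' =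
        if ((j:Int) ∈ is ∧ PySem.Set.contains s (digitStrChar (j:Int)) = true) then '1' else b.getD j '0'
  | [], _, b, hb => by simp [hb]
  | i :: is, his, b, hb => by
    have hi := his i (List.mem_cons_self ..)
    have hstep : (if PySem.Set.contains s (digitStrChar i) then PySem.List.pySetD b i '1' else b).length = 10 := by
      split_ifs <;> simp [PySem.List.length_pySetD, hb]
    have hgstep : ∀ j : Nat, j < 10 →
        (if PySem.Set.contains s (digitStrChar i) then PySem.List.pySetD b i '1' else b).getD j '0' =
          if (i = (j:Int) ∧ PySem.Set.contains s (digitStrChar i) = true) then '1' else b.getD j '0' := by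
      intro j hj
      split_ifs with h1 h2 h2
      · rw [PySem.List.pySetD_of_nonneg b '1' hi.1, List.getD_eq_getElem?_getD, List.getElem?_set,
          if_pos (by omega : i.toNat = j), if_pos (by omega : i.toNat < b.length)]
        rfl
      · rw [PySem.List.pySetD_of_nonneg b '1' hi.1, List.getD_eq_getElem?_getD, List.getElem?_set,
          if_neg (fun e => h2 ⟨by omega, h1⟩), ← List.getD_eq_getElem?_getD]
      · exact absurd h2.2 h1
      · rfl
    obtain ⟨ihlen, ihg⟩ := foldA s is (fun i hi => his i (List.mem_cons_of_mem _ hi)) _ hstep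
    refine ⟨ihlen, fun j hj => ?_⟩
    rw [List.foldl_cons]
    rw [ihg j hj, hgstep j hj]
    by_cases hm : ((j:Int) ∈ is ∧ PySem.Set.contains s (digitStrChar (j:Int)) = true)
    · rw [if_pos hm, if_pos ⟨List.mem_cons_of_mem _ hm.1, hm.2⟩]
    · rw [if_neg hm]
      by_cases he : (i = (j:Int) ∧ PySem.Set.contains s (digitStrChar i) = true)
      · rw [if_pos he]
        rcases he with ⟨e, hc⟩
        subst e
        rw [if_pos ⟨List.mem_cons_self .., hc⟩]
      · rw [if_neg he, if_neg]
        rintro ⟨hm1, hm2⟩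
        rcases List.mem_cons.1 hm1 with e | e
        · exact he ⟨e.symm, by rw [e] at hm2; exact hm2⟩
        · exact hm ⟨e, hm2⟩

set_option maxHeartbeats 1600000 in
theorem hashX_eq_mask (x : String) : hashX x = Int.ofNat (mask x.toList) := by
  unfold hashX
  dsimp only
  rw [show PySem.List.pyRange 0 10 1 = [0,1,2,3,4,5,6,7,8,9] from by decide]
  obtain ⟨hl, hg⟩ := foldA (PySem.Set.ofList x.toList) [0,1,2,3,4,5,6,7,8,9] (by decide)
    (List.replicate 10 '0') (by simp)
  rw [len10 _ hl, hg 0 (by norm_num), hg 1 (by norm_num), hg 2 (by norm_num), hg 3 (by norm_num),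
    hg 4 (by norm_num), hg 5 (by norm_num), hg 6 (by norm_num), hg 7 (by norm_num),
    hg 8 (by norm_num), hg 9 (by norm_num)]
  simp [pysem, digitStrChar, List.foldl]
  simp only [mask, show Char.ofNat 48 = '0' from by decide, show Char.ofNat 49 = '1' from by decide,
    show Char.ofNat 50 = '2' from by decide, show Char.ofNat 51 = '3' from by decide,
    show Char.ofNat 52 = '4' from by decide, show Char.ofNat 53 = '5' from by decide,
    show Char.ofNat 54 = '6' from by decide, show Char.ofNat 55 = '7' from by decide,
    show Char.ofNat 56 = '8' from by decide, show Char.ofNat 57 = '9' from by decide]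
  simp only [← Bool.cond_decide]
  generalize decide ('0' ∈ x.toList) = b0
  generalize decide ('1' ∈ x.toList) = b1
  generalize decide ('2' ∈ x.toList) = b2
  generalize decide ('3' ∈ x.toList) = b3
  generalize decide ('4' ∈ x.toList) = b4
  generalize decide ('5' ∈ x.toList) = b5
  generalize decide ('6' ∈ x.toList) = b6
  generalize decide ('7' ∈ x.toList) = b7
  generalize decide ('8' ∈ x.toList) = b8
  generalize decide ('9' ∈ x.toList) = b9
  revert b0 b1 b2 b3 b4 b5 b6 b7 b8 b9
  decide

-- ===== VERDICT (by name: the statement is the Claim_ definition above) =====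
theorem hashX_spec : Claim_equal_hashX := by
  intro x _
  unfold Spec_hashX
  rw [hashX_eq_mask, hashX_alt_eq_mask]
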